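-- pv_equiv track=rewrite | github.com/dbrucknr/Algorithms | python/matrix/find_max_path.py | find_max_path_simple
-- ===== SOURCE A (Python) =====
-- def find_max_path_simple(matrix):
--     max_sum = 0
--     for row in matrix:
--         row_max_sum = 0
--         for element in row:
--             row_max_sum = max(row_max_sum, element + max_sum)
--         max_sum = max(max_sum, row_max_sum)
--     return max_sum
-- ===== SOURCE B (Python) =====
-- def find_max_path_simple(matrix):
--     peaks = [max(row + [0]) for row in matrix]
--     return sum(peaks)
-- ===== Notes on version B (the rewrite author's own statement) =====
-- stated objective: simpler
-- what changed: Replaces A's single-pass DP (inner running-max loop folded into an outer running accumulator) by two branch-free stages: map each row to max(row+[0]) using a 0 sentinel, then sum the resulting list.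
import Mathlib
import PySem

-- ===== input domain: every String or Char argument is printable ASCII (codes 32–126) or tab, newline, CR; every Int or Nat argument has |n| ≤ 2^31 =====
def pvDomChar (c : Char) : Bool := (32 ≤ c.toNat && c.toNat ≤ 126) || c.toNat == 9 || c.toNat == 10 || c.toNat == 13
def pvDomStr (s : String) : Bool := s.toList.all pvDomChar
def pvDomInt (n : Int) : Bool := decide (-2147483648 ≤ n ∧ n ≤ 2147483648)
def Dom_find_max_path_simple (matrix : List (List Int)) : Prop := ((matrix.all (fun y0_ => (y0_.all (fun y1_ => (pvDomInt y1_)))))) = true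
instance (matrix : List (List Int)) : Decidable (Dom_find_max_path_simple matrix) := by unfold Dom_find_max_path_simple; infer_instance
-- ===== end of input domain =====

-- B replaces A's single-pass DP with two branch-free stages: map rows to max(row+[0]) with a 0 sentinel, then sum (objective: simpler).


-- ===== PORT A =====
def find_max_path_simple (matrix : List (List Int)) : Int :=
  matrix.foldl (fun max_sum row =>
    max max_sum (row.foldl (fun row_max_sum element => max row_max_sum (element + max_sum)) 0)) 0

-- ===== PORT B =====
def find_max_path_simple_alt (matrix : List (List Int)) : Int :=
  (matrix.map (fun row => (PySem.List.max? (row ++ [0]) (fun x => x)).getD 0)).sum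

-- ===== PRECONDITION & SPEC =====
def Spec_find_max_path_simple (matrix : List (List Int)) (out : Int) : Prop := out = find_max_path_simple_alt matrix
instance (matrix : List (List Int)) (out : Int) : Decidable (Spec_find_max_path_simple matrix out) := by unfold Spec_find_max_path_simple; infer_instance

-- ===== CLAIM (what is proved, stated in full; the proofs are below) =====
def Claim_equal_find_max_path_simple : Prop := ∀ (matrix : List (List Int)), Dom_find_max_path_simple matrix → Spec_find_max_path_simple matrix (find_max_path_simple matrix)

-- ===== LEMMAS AND PROOFS =====

-- stage one of B: max(row ++ [0]) is the clamped row maximum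
theorem pv_peak (row : List Int) :
    (PySem.List.max? (row ++ [0]) (fun x => x)).getD 0
      = match row with
        | [] => 0
        | x :: t => max (t.foldl max x) 0 := by
  cases row with
  | nil => simp [PySem.List.max?_id_cons]
  | cons x t =>
    have : (x :: t) ++ [0] = x :: (t ++ [0]) := rfl
    rw [this, PySem.List.max?_id_cons]
    simp [List.foldl_append]

-- A's inner loop over a nonempty row computes max r (max(row) + s)
theorem pv_inner (t : List Int) : ∀ (x s r : Int),
    (x :: t).foldl (fun row_max_sum element => max row_max_sum (element + s)) r
      = max r ((t.foldl max x) + s) := by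
  induction t with
  | nil => intro x s r; simp
  | cons y t' ih =>
    intro x s r
    have h1 : (x :: y :: t').foldl (fun r e => max r (e + s)) r
        = (y :: t').foldl (fun r e => max r (e + s)) (max r (x + s)) := rfl
    rw [h1, ih y s (max r (x + s))]
    have h2 : (y :: t').foldl max x = t'.foldl max (max x y) := rfl
    rw [h2, List.foldl_assoc]
    simp only [max_def]
    split_ifs <;> omega

-- A's per-row step on a nonnegative accumulator adds exactly B's stage-one peak
theorem pv_step (row : List Int) (s : Int) (hs : 0 ≤ s) :
    max s (row.foldl (fun row_max_sum element => max row_max_sum (element + s)) 0)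
      = s + (PySem.List.max? (row ++ [0]) (fun x => x)).getD 0 := by
  cases row with
  | nil => rw [pv_peak]; simpa using hs
  | cons x t =>
    rw [pv_inner t x s 0, pv_peak]
    show max s (max 0 (t.foldl max x + s)) = s + max (t.foldl max x) 0
    generalize t.foldl max x = m
    simp only [max_def]
    split_ifs <;> omega

theorem pv_main (matrix : List (List Int)) : ∀ (s : Int), 0 ≤ s →
    matrix.foldl (fun max_sum row =>
      max max_sum (row.foldl (fun row_max_sum element => max row_max_sum (element + max_sum)) 0)) s
    = s + (matrix.map (fun row => (PySem.List.max? (row ++ [0]) (fun x => x)).getD 0)).sum := by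
  induction matrix with
  | nil => intro s _; simp
  | cons row rest ih =>
    intro s hs
    simp only [List.foldl_cons, List.map_cons, List.sum_cons]
    rw [pv_step row s hs, ih _ (by
      have := pv_step row s hs
      have h0 : s ≤ max s (row.foldl (fun r e => max r (e + s)) 0) := le_max_left _ _
      omega)]
    ring

-- ===== VERDICT (by name: the statement is the Claim_ definition above) =====
theorem find_max_path_simple_spec : Claim_equal_find_max_path_simple := by
  intro matrix _
  unfold Spec_find_max_path_simple find_max_path_simple find_max_path_simple_alt
  rw [pv_main matrix 0 le_rfl]; ring
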